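-- pv_equiv track=rewrite | github.com/mukunda1518/Data-Structures-Algorithms | binary_search/bloom_day.py | is_bouquets_possible
-- ===== SOURCE A (Python) =====
-- def is_bouquets_possible(bloomDay, day, m, k):
--     no_of_bouquets = 0
--     count = 0
--     for b_day in bloomDay:
--         if b_day <= day:
--             count += 1
--         else:
--             no_of_bouquets += count // k
--             count = 0
--     no_of_bouquets += count // k
--     return no_of_bouquets >= m
-- ===== SOURCE B (Python) =====
-- from collections import deque
--
-- def _split_run(rest, day):
--     # pop the maximal leading run of bloomed flowers off 'rest'; return its length
--     i = 0
--     while rest and rest[0] <= day: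
--         rest.popleft()
--         i += 1
--     return i
--
-- def is_bouquets_possible(bloomDay, day, m, k):
--     # segmentation: split the sequence into maximal bloomed runs, each run of
--     # length r contributes r // k bouquets
--     total = 0
--     rest = deque(bloomDay)
--     while rest:
--         if rest[0] <= day:
--             total += _split_run(rest, day) // k
--         else:
--             rest.popleft()
--     return total >= m
-- ===== Notes on version B (the rewrite author's own statement) =====
-- stated objective: alternative
-- what changed: Replaces A's running counter with reset by explicit segmentation: repeatedly split off the maximal leading run of bloomed flowers and add run_length // k per run.
import Mathlib
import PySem

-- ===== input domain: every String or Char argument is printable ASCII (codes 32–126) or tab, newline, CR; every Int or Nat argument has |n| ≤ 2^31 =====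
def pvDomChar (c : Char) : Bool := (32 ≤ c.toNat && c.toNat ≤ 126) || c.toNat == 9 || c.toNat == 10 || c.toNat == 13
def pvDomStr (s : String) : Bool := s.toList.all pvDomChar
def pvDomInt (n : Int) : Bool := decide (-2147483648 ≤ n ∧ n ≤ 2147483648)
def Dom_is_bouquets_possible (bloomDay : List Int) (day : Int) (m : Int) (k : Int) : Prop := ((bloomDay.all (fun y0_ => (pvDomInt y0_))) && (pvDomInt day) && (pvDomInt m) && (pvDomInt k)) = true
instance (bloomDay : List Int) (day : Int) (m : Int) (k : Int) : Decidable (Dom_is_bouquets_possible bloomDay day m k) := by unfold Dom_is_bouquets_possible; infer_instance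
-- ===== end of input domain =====

-- B replaces A's running counter-with-reset by explicit segmentation into maximal
-- bloomed runs (alternative decomposition, same cost); return values only.

-- ===== PORT A =====
-- the 'for b_day in bloomDay' loop over state (no_of_bouquets, count)
def pvLoopA (day k : Int) : List Int → Int × Int → Int × Int
  | [], s => s
  | b :: rest, (nb, count) =>
    if b ≤ day then pvLoopA day k rest (nb, count + 1)
    else pvLoopA day k rest (nb + PySem.Int.floordiv count k, 0)

def is_bouquets_possible (bloomDay : List Int) (day : Int) (m : Int) (k : Int) : Bool :=
  let s := pvLoopA day k bloomDay (0, 0)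
  decide (s.1 + PySem.Int.floordiv s.2 k ≥ m)

-- ===== PORT B =====
-- _split_run: length of the maximal leading bloomed run, and the remainder
def pvSplitRun (day : Int) : List Int → Nat × List Int
  | [] => (0, [])
  | x :: xs =>
    if x ≤ day then
      let p := pvSplitRun day xs
      (p.1 + 1, p.2)
    else (0, x :: xs)

theorem pvSplitRun_len (day : Int) (l : List Int) :
    (pvSplitRun day l).1 + (pvSplitRun day l).2.length = l.length := by
  induction l with
  | nil => simp [pvSplitRun]
  | cons x xs ih =>
    by_cases h : x ≤ day <;> simp [pvSplitRun, h] <;> omega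

-- the 'while rest' loop over state (rest, total)
def pvLoopB (day k : Int) : List Int → Int → Int
  | [], total => total
  | x :: xs, total =>
    if h : x ≤ day then
      let p := pvSplitRun day (x :: xs)
      pvLoopB day k p.2 (total + PySem.Int.floordiv (p.1 : Int) k)
    else pvLoopB day k xs total
termination_by l _ => l.length
decreasing_by
  · have := pvSplitRun_len day (x :: xs)
    simp [pvSplitRun, h] at this ⊢
    omega
  · simp

def is_bouquets_possible_alt (bloomDay : List Int) (day : Int) (m : Int) (k : Int) : Bool :=
  decide (pvLoopB day k bloomDay 0 ≥ m)

-- ===== PRECONDITION & SPEC =====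
-- Pre_ excludes k = 0, on which Python A raises ZeroDivisionError.
def Pre_is_bouquets_possible (bloomDay : List Int) (day : Int) (m : Int) (k : Int) : Prop := k ≠ 0
instance (bloomDay : List Int) (day : Int) (m : Int) (k : Int) : Decidable (Pre_is_bouquets_possible bloomDay day m k) := by unfold Pre_is_bouquets_possible; infer_instance

def pvWitness_is_bouquets_possible : List Int × Int × Int × Int := ([1, 10, 3, 10, 2], 3, 1, 2)

def Spec_is_bouquets_possible (bloomDay : List Int) (day : Int) (m : Int) (k : Int) (out : Bool) : Prop := out = is_bouquets_possible_alt bloomDay day m k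
instance (bloomDay : List Int) (day : Int) (m : Int) (k : Int) (out : Bool) : Decidable (Spec_is_bouquets_possible bloomDay day m k out) := by unfold Spec_is_bouquets_possible; infer_instance

-- ===== CLAIM (what is proved, stated in full; the proofs are below) =====
def Claim_equal_is_bouquets_possible : Prop := ∀ (bloomDay : List Int) (day : Int) (m : Int) (k : Int), Dom_is_bouquets_possible bloomDay day m k → Pre_is_bouquets_possible bloomDay day m k → Spec_is_bouquets_possible bloomDay day m k (is_bouquets_possible bloomDay day m k)

-- ===== LEMMAS AND PROOFS =====

-- running A's loop through a bloomed prefix just accumulates its length into count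
theorem pvLoopA_run (day k : Int) (l : List Int) (nb c : Int) :
    pvLoopA day k l (nb, c) =
      pvLoopA day k (pvSplitRun day l).2 (nb, c + ((pvSplitRun day l).1 : Int)) := by
  induction l generalizing c with
  | nil => simp [pvSplitRun]
  | cons x xs ih =>
    by_cases h : x ≤ day
    · simp only [pvSplitRun, h, if_pos, pvLoopA]
      rw [ih]
      push_cast
      ring_nf
    · simp [pvSplitRun, h, pvLoopA]

theorem pvSplitRun_rest (day : Int) (l : List Int) :
    (pvSplitRun day l).2 = [] ∨
      ∃ y ys, (pvSplitRun day l).2 = y :: ys ∧ ¬ y ≤ day := by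
  induction l with
  | nil => simp [pvSplitRun]
  | cons x xs ih =>
    by_cases h : x ≤ day
    · simpa [pvSplitRun, h] using ih
    · exact Or.inr ⟨x, xs, by simp [pvSplitRun, h], h⟩

-- the final value of A's loop equals B's segmentation loop
theorem pvMain (day k : Int) (l : List Int) (nb : Int) :
    (pvLoopA day k l (nb, 0)).1 + PySem.Int.floordiv (pvLoopA day k l (nb, 0)).2 k =
      pvLoopB day k l nb := by
  match l with
  | [] => simp [pvLoopA, pvLoopB, PySem.Int.floordiv]
  | x :: xs =>
    by_cases h : x ≤ day
    · rw [pvLoopA_run day k (x :: xs) nb 0]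
      rcases pvSplitRun_rest day (x :: xs) with hr | ⟨y, ys, hr, hy⟩
      · rw [hr]
        simp only [pvLoopA, pvLoopB, h, dif_pos, zero_add]
        rw [hr]
        simp [pvLoopB]
      · have hlen : ys.length < xs.length := by
          have := pvSplitRun_len day (x :: xs)
          rw [hr] at this
          simp [pvSplitRun, h] at this ⊢
          omega
        rw [hr]
        simp only [pvLoopA, zero_add]
        rw [if_neg hy]
        rw [pvMain day k ys (nb + PySem.Int.floordiv ((pvSplitRun day (x :: xs)).1 : Int) k)]
        simp only [pvLoopB, h, dif_pos]
        rw [hr]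
        simp [pvLoopB, hy]
    · simp only [pvLoopA, pvLoopB, h]
      rw [show nb + PySem.Int.floordiv 0 k = nb by simp [PySem.Int.floordiv]]
      exact pvMain day k xs nb
termination_by l.length
decreasing_by
  · simp only [List.length_cons]
    omega
  · simp

-- ===== VERDICT (by name: the statement is the Claim_ definition above) =====
theorem is_bouquets_possible_spec : Claim_equal_is_bouquets_possible := by
  intro bloomDay day m k _ _
  unfold Spec_is_bouquets_possible is_bouquets_possible is_bouquets_possible_alt
  simp only [pvMain day k bloomDay 0]
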